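-- pv_equiv track=rewrite | github.com/geraldthewes/macropad-setup | compile_macropad.py | qmk_to_human
-- ===== SOURCE A (Python) =====
-- def qmk_to_human(value: str) -> str:
--     """Translate a QMK keycode expression to human-readable Emacs-style notation."""
--     value = value.strip()
--
--     # Check for modifier wrappers
--     modifier_map = {
--         'LCTL': 'C-',
--         'LSFT': 'S-',
--         'LALT': 'A-',
--         'LGUI': 'G-',
--     }
--     for mod, prefix in modifier_map.items():
--         if value.startswith(f'{mod}(') and value.endswith(')'):
--             inner = value[len(mod) + 1:-1]
--             return prefix + qmk_to_human(inner)
--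
--     # Strip KC_ prefix
--     if value.startswith('KC_'):
--         key = value[3:]
--         special = {'SPC': 'SPC', 'ESC': 'ESC', 'TAB': 'TAB'}
--         if key in special:
--             return special[key]
--         return key.lower()
--
--     return value
-- ===== SOURCE B (Python) =====
-- _MODMAP = {'LCTL': 'C-', 'LSFT': 'S-', 'LALT': 'A-', 'LGUI': 'G-'}
--
--
-- def _core(v):
--     if not v.startswith('KC_'):
--         return v
--     key = v[3:]
--     return key if key in ('SPC', 'ESC', 'TAB') else key.lower()
--
--
-- def qmk_to_human(value: str) -> str:
--     """Translate a QMK keycode expression to human-readable Emacs-style notation."""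
--     marks = []
--     v = value.strip()
--     while v.endswith(')') and v[:4] in _MODMAP and v[4:5] == '(':
--         marks.append(_MODMAP[v[:4]])
--         v = v[5:-1].strip()
--     return ''.join(marks) + _core(v)
-- ===== Notes on version B (the rewrite author's own statement) =====
-- stated objective: alternative
-- what changed: Replaces A's recursion with a per-level linear scan over the modifier list (each wrapper prepending to a recursive result) by an iterative loop that looks the fixed 4-char prefix up in a dict, collects the marks in a list joined once at the end, and does the KC_/special handling in a separate helper after the loop.
import Mathlib
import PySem

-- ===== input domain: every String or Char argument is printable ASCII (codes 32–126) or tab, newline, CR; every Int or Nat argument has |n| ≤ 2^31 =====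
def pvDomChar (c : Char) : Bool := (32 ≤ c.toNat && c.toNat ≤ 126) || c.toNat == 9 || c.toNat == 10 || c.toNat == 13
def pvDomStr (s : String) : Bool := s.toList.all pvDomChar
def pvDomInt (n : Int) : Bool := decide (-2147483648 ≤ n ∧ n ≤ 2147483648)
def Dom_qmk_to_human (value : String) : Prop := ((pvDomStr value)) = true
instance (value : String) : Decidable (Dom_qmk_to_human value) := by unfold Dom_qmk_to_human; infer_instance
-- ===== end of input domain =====

-- B replaces A's per-modifier linear scan + recursion by an iterative loop that looks the
-- 4-char prefix up in a dict and collects the marks in a list joined at the end; objective: alternative decomposition.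

-- ===== PORT A =====
-- modifier_map.items(), in insertion order
def pvModItems : List (List Char × List Char) :=
  [("LCTL".toList, "C-".toList), ("LSFT".toList, "S-".toList),
   ("LALT".toList, "A-".toList), ("LGUI".toList, "G-".toList)]

-- the `for mod, prefix in modifier_map.items():` loop with its early return,
-- returning the matched (prefix, inner) so the recursion can be applied outside
def pvAFind : List (List Char × List Char) → List Char → Option (List Char × List Char)
  | [], _ => none
  | (md, pre) :: rest, v =>
    if PySem.Chars.startswith v (md ++ ['(']) && PySem.Chars.endswith v [')'] then
      some (pre, PySem.List.slice v (some ((md.length : Int) + 1)) (some (-1)))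
    else pvAFind rest v

-- the `special` dict of A
def pvSpecialDict : PySem.Dict (List Char) (List Char) :=
  PySem.Dict.mk [("SPC".toList, "SPC".toList), ("ESC".toList, "ESC".toList),
                 ("TAB".toList, "TAB".toList)]

theorem pvStrip_len (s : List Char) : (PySem.Chars.strip s).length ≤ s.length := by
  calc (PySem.Chars.strip s).length
      ≤ (PySem.Chars.lstrip s).length := by
        simp only [PySem.Chars.strip, PySem.Chars.rstrip, List.length_reverse]
        exact le_trans (List.length_dropWhile_le _ _) (by simp)
    _ ≤ s.length := List.length_dropWhile_le _ _

theorem pvAFind_len {items : List (List Char × List Char)} {v p i : List Char}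
    (h : pvAFind items v = some (p, i)) : i.length < v.length := by
  induction items with
  | nil => simp [pvAFind] at h
  | cons hd rest ih =>
    obtain ⟨md, pre⟩ := hd
    rw [pvAFind] at h
    split at h
    · rename_i hc
      simp only [Bool.and_eq_true, PySem.Chars.startswith_iff] at hc
      have hlen : md.length + 1 ≤ v.length := by
        have := hc.1.length_le; simpa using this
      simp only [Option.some.injEq, Prod.mk.injEq] at h
      have : i = PySem.List.slice v (some ((md.length : Int) + 1)) (some (-1)) := h.2.symm
      subst this
      have : ((md.length : Int) + 1) = ((md.length + 1 : Nat) : Int) := by push_cast; ring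
      rw [this, PySem.List.length_slice, PySem.List.clampIdx_neg_one,
          PySem.List.clampIdx_natCast]
      omega
    · exact ih h

def pvGoA (cs : List Char) : List Char :=
  let v := PySem.Chars.strip cs
  match h : pvAFind pvModItems v with
  | some (pre, inner) => pre ++ pvGoA inner
  | none =>
    if PySem.Chars.startswith v "KC_".toList then
      let key := PySem.List.slice v (some 3) none
      match PySem.Dict.get? pvSpecialDict key with
      | some s => s
      | none => PySem.Chars.lower key
    else v
termination_by cs.length
decreasing_by
  exact lt_of_lt_of_le (pvAFind_len h) (pvStrip_len cs)

def qmk_to_human (value : String) : String := String.ofList (pvGoA value.toList)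

-- ===== PORT B =====
-- the _MODMAP dict of Source B
def pvModMap : PySem.Dict (List Char) (List Char) :=
  PySem.Dict.mk [("LCTL".toList, "C-".toList), ("LSFT".toList, "S-".toList),
                 ("LALT".toList, "A-".toList), ("LGUI".toList, "G-".toList)]

-- _core of Source B
def pvCore (v : List Char) : List Char :=
  if !(PySem.Chars.startswith v "KC_".toList) then v
  else
    let key := PySem.List.slice v (some 3) none
    if key ∈ ["SPC".toList, "ESC".toList, "TAB".toList] then key else PySem.Chars.lower key

-- the while-loop guard `v.endswith(')') and v[:4] in _MODMAP and v[4:5] == '('`,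
-- returning the mark _MODMAP[v[:4]] the body appends when the guard holds
def pvBCond (v : List Char) : Option (List Char) :=
  if PySem.Chars.endswith v [')'] then
    match PySem.Dict.get? pvModMap (PySem.List.slice v none (some 4)) with
    | some mark => if PySem.List.slice v (some 4) (some 5) = ['('] then some mark else none
    | none => none
  else none

theorem pvBCond_ne_nil {v : List Char} {m : List Char} (h : pvBCond v = some m) : v ≠ [] := by
  intro hv; subst hv
  rw [show pvBCond ([] : List Char) = none from by decide] at h
  simp at h

theorem pvBCond_len {v m : List Char} (h : pvBCond v = some m) :
    (PySem.List.slice v (some 5) (some (-1))).length < v.length := by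
  have hne : v ≠ [] := pvBCond_ne_nil h
  have hpos : 0 < v.length := List.length_pos_iff.mpr hne
  rw [PySem.List.length_slice, PySem.List.clampIdx_neg_one]
  omega

-- the `while True`-style loop of Source B: marks accumulated, ''.join + _core after it
def pvBLoop (marks : List (List Char)) (v : List Char) : List Char :=
  match h : pvBCond v with
  | some mark =>
      pvBLoop (marks ++ [mark]) (PySem.Chars.strip (PySem.List.slice v (some 5) (some (-1))))
  | none => PySem.Chars.join [] marks ++ pvCore v
termination_by v.length
decreasing_by
  exact lt_of_le_of_lt (pvStrip_len _) (pvBCond_len h)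

def qmk_to_human_alt (value : String) : String :=
  String.ofList (pvBLoop [] (PySem.Chars.strip value.toList))

-- ===== PRECONDITION & SPEC =====
def Spec_qmk_to_human (value : String) (out : String) : Prop := out = qmk_to_human_alt value
instance (value : String) (out : String) : Decidable (Spec_qmk_to_human value out) := by unfold Spec_qmk_to_human; infer_instance

-- ===== CLAIM (what is proved, stated in full; the proofs are below) =====
def Claim_equal_qmk_to_human : Prop := ∀ (value : String), Dom_qmk_to_human value → Spec_qmk_to_human value (qmk_to_human value)

-- ===== LEMMAS AND PROOFS =====

theorem pv_take5 (v : List Char) : v.take 5 = v.take 4 ++ (v.drop 4).take 1 := by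
  rw [show (5 : Nat) = 4 + 1 from rfl, List.take_add]

theorem pv_sw_iff (md : List Char) (hmd : md.length = 4) (v : List Char) :
    PySem.Chars.startswith v (md ++ ['(']) = true ↔
      (v.take 4 = md ∧ (v.drop 4).take 1 = ['(']) := by
  rw [PySem.Chars.startswith_iff]
  constructor
  · intro hp
    have hl : (md ++ ['(']).length = 5 := by simp [hmd]
    have heq := List.prefix_iff_eq_take.mp hp
    rw [hl, pv_take5] at heq
    have h5 : 5 ≤ v.length := by have := hp.length_le; simpa [hl] using this
    have hlen4 : md.length = (v.take 4).length := by simp [hmd, List.length_take]; omega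
    have := List.append_inj heq hlen4
    exact ⟨this.1.symm, this.2.symm⟩
  · rintro ⟨h1, h2⟩
    rw [← h1, ← h2, ← pv_take5]
    exact List.take_prefix 5 v

theorem pv_sw_true (md : List Char) (hmd : md.length = 4) {v : List Char}
    (h1 : v.take 4 = md) (h2 : (v.drop 4).take 1 = ['(']) :
    PySem.Chars.startswith v (md ++ ['(']) = true :=
  (pv_sw_iff md hmd v).mpr ⟨h1, h2⟩

theorem pv_sw_ne (md : List Char) (hmd : md.length = 4) {v : List Char}
    (h1 : v.take 4 ≠ md) : PySem.Chars.startswith v (md ++ ['(']) = false :=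
  Bool.eq_false_iff.mpr (fun hc => h1 ((pv_sw_iff md hmd v).mp hc).1)

theorem pv_sw_npar (md : List Char) (hmd : md.length = 4) {v : List Char}
    (h2 : (v.drop 4).take 1 ≠ ['(']) : PySem.Chars.startswith v (md ++ ['(']) = false :=
  Bool.eq_false_iff.mpr (fun hc => h2 ((pv_sw_iff md hmd v).mp hc).2)

theorem pv_get_none {k : List Char} (h1 : k ≠ "LCTL".toList) (h2 : k ≠ "LSFT".toList)
    (h3 : k ≠ "LALT".toList) (h4 : k ≠ "LGUI".toList) :
    PySem.Dict.get? pvModMap k = none := by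
  have e1 : (['L','C','T','L'] == k) = false :=
    beq_eq_false_iff_ne.mpr (fun hc => h1 (by rw [← hc]; decide))
  have e2 : (['L','S','F','T'] == k) = false :=
    beq_eq_false_iff_ne.mpr (fun hc => h2 (by rw [← hc]; decide))
  have e3 : (['L','A','L','T'] == k) = false :=
    beq_eq_false_iff_ne.mpr (fun hc => h3 (by rw [← hc]; decide))
  have e4 : (['L','G','U','I'] == k) = false :=
    beq_eq_false_iff_ne.mpr (fun hc => h4 (by rw [← hc]; decide))
  simp [PySem.Dict.get?, pvModMap, List.find?, e1, e2, e3, e4]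

-- one iteration of B's guard agrees with A's modifier scan
theorem pv_step_eq (v : List Char) :
    pvAFind pvModItems v =
      (pvBCond v).map (fun m => (m, PySem.List.slice v (some 5) (some (-1)))) := by
  by_cases hend : PySem.Chars.endswith v [')'] = true
  · have hsl4 : PySem.List.slice v none (some 4) = v.take 4 := by
      rw [PySem.List.slice_to v (by norm_num : (0:Int) ≤ 4)]; rfl
    have hsl45 : PySem.List.slice v (some 4) (some 5) = (v.drop 4).take 1 := by
      rw [PySem.List.slice_toNat v (by norm_num : (0:Int) ≤ 4) (by norm_num : (0:Int) ≤ 5)]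
      rfl
    by_cases hpar : (v.drop 4).take 1 = ['(']
    · by_cases h1 : v.take 4 = "LCTL".toList
      · have sC : PySem.Chars.startswith v ['L','C','T','L','('] = true :=
          pv_sw_true "LCTL".toList (by decide) h1 hpar
        have hget : PySem.Dict.get? pvModMap (v.take 4) = some ("C-".toList) := by
          rw [h1]; decide
        simp [pvAFind, pvModItems, pvBCond, hend, hsl4, hsl45, hpar, hget, sC]
      · by_cases h2 : v.take 4 = "LSFT".toList
        · have nC : PySem.Chars.startswith v ['L','C','T','L','('] = false :=
            pv_sw_ne "LCTL".toList (by decide) h1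
          have sS : PySem.Chars.startswith v ['L','S','F','T','('] = true :=
            pv_sw_true "LSFT".toList (by decide) h2 hpar
          have hget : PySem.Dict.get? pvModMap (v.take 4) = some ("S-".toList) := by
            rw [h2]; decide
          simp [pvAFind, pvModItems, pvBCond, hend, hsl4, hsl45, hpar, hget, nC, sS]
        · by_cases h3 : v.take 4 = "LALT".toList
          · have nC : PySem.Chars.startswith v ['L','C','T','L','('] = false :=
              pv_sw_ne "LCTL".toList (by decide) h1
            have nS : PySem.Chars.startswith v ['L','S','F','T','('] = false :=
              pv_sw_ne "LSFT".toList (by decide) h2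
            have sA : PySem.Chars.startswith v ['L','A','L','T','('] = true :=
              pv_sw_true "LALT".toList (by decide) h3 hpar
            have hget : PySem.Dict.get? pvModMap (v.take 4) = some ("A-".toList) := by
              rw [h3]; decide
            simp [pvAFind, pvModItems, pvBCond, hend, hsl4, hsl45, hpar, hget, nC, nS, sA]
          · by_cases h4 : v.take 4 = "LGUI".toList
            · have nC : PySem.Chars.startswith v ['L','C','T','L','('] = false :=
                pv_sw_ne "LCTL".toList (by decide) h1
              have nS : PySem.Chars.startswith v ['L','S','F','T','('] = false :=
                pv_sw_ne "LSFT".toList (by decide) h2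
              have nA : PySem.Chars.startswith v ['L','A','L','T','('] = false :=
                pv_sw_ne "LALT".toList (by decide) h3
              have sG : PySem.Chars.startswith v ['L','G','U','I','('] = true :=
                pv_sw_true "LGUI".toList (by decide) h4 hpar
              have hget : PySem.Dict.get? pvModMap (v.take 4) = some ("G-".toList) := by
                rw [h4]; decide
              simp [pvAFind, pvModItems, pvBCond, hend, hsl4, hsl45, hpar, hget,
                    nC, nS, nA, sG]
            · have nC : PySem.Chars.startswith v ['L','C','T','L','('] = false :=
                pv_sw_ne "LCTL".toList (by decide) h1
              have nS : PySem.Chars.startswith v ['L','S','F','T','('] = false :=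
                pv_sw_ne "LSFT".toList (by decide) h2
              have nA : PySem.Chars.startswith v ['L','A','L','T','('] = false :=
                pv_sw_ne "LALT".toList (by decide) h3
              have nG : PySem.Chars.startswith v ['L','G','U','I','('] = false :=
                pv_sw_ne "LGUI".toList (by decide) h4
              simp [pvAFind, pvModItems, pvBCond, hend, hsl4,
                    pv_get_none h1 h2 h3 h4, nC, nS, nA, nG]
    · have nC : PySem.Chars.startswith v ['L','C','T','L','('] = false :=
        pv_sw_npar "LCTL".toList (by decide) hpar
      have nS : PySem.Chars.startswith v ['L','S','F','T','('] = false :=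
        pv_sw_npar "LSFT".toList (by decide) hpar
      have nA : PySem.Chars.startswith v ['L','A','L','T','('] = false :=
        pv_sw_npar "LALT".toList (by decide) hpar
      have nG : PySem.Chars.startswith v ['L','G','U','I','('] = false :=
        pv_sw_npar "LGUI".toList (by decide) hpar
      simp [pvAFind, pvModItems, pvBCond, hend, hsl4, hsl45, hpar, nC, nS, nA, nG]
      cases PySem.Dict.get? pvModMap (v.take 4) <;> rfl
  · have hend' : PySem.Chars.endswith v [')'] = false := by
      cases h : PySem.Chars.endswith v [')'] with
      | true => exact absurd h hend
      | false => rfl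
    simp [pvAFind, pvModItems, pvBCond, hend']

theorem pvJoin_nil (ms : List (List Char)) : PySem.Chars.join [] ms = ms.flatten := by
  induction ms with
  | nil => rfl
  | cons h t ih =>
    cases t with
    | nil => simp [PySem.Chars.join, List.intercalate]
    | cons h2 t2 => rw [PySem.Chars.join_cons_cons]; simp_all

theorem pvSpecial_eq (key : List Char) :
    (match PySem.Dict.get? pvSpecialDict key with
     | some s => s
     | none => PySem.Chars.lower key) =
    (if key ∈ ["SPC".toList, "ESC".toList, "TAB".toList] then key
     else PySem.Chars.lower key) := by
  by_cases h1 : key = "SPC".toList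
  · subst h1; decide
  · by_cases h2 : key = "ESC".toList
    · subst h2; decide
    · by_cases h3 : key = "TAB".toList
      · subst h3; decide
      · have e1 : (['S','P','C'] == key) = false :=
          beq_eq_false_iff_ne.mpr (fun hc => h1 (by rw [← hc]; decide))
        have e2 : (['E','S','C'] == key) = false :=
          beq_eq_false_iff_ne.mpr (fun hc => h2 (by rw [← hc]; decide))
        have e3 : (['T','A','B'] == key) = false :=
          beq_eq_false_iff_ne.mpr (fun hc => h3 (by rw [← hc]; decide))
        have hget : PySem.Dict.get? pvSpecialDict key = none := by
          simp [PySem.Dict.get?, pvSpecialDict, List.find?, e1, e2, e3]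
        rw [hget]
        have hmem : key ∉ ["SPC".toList, "ESC".toList, "TAB".toList] := by
          intro hmem
          rcases (by simpa using hmem : key = "SPC".toList ∨
            key = "ESC".toList ∨ key = "TAB".toList) with hc | hc | hc
          · exact h1 hc
          · exact h2 hc
          · exact h3 hc
        rw [if_neg hmem]

theorem pvGoA_some {cs pre inner : List Char}
    (h : pvAFind pvModItems (PySem.Chars.strip cs) = some (pre, inner)) :
    pvGoA cs = pre ++ pvGoA inner := by
  rw [pvGoA]
  split
  · rename_i p i h'
    rw [h] at h'
    simp only [Option.some.injEq, Prod.mk.injEq] at h'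
    rw [h'.1, h'.2]
  · rename_i h'
    rw [h] at h'
    exact absurd h' (by simp)

theorem pvGoA_none {cs : List Char}
    (h : pvAFind pvModItems (PySem.Chars.strip cs) = none) :
    pvGoA cs = pvCore (PySem.Chars.strip cs) := by
  rw [pvGoA, pvCore]
  split
  · rename_i p i h'
    rw [h] at h'; exact absurd h' (by simp)
  · rename_i h'
    cases hkc : PySem.Chars.startswith (PySem.Chars.strip cs) "KC_".toList with
    | true => simpa using pvSpecial_eq (PySem.List.slice (PySem.Chars.strip cs) (some 3) none)
    | false => simp

theorem pvBLoop_some {v mark : List Char} (h : pvBCond v = some mark)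
    (marks : List (List Char)) :
    pvBLoop marks v =
      pvBLoop (marks ++ [mark]) (PySem.Chars.strip (PySem.List.slice v (some 5) (some (-1)))) := by
  rw [pvBLoop]
  split
  · rename_i m h'
    rw [h] at h'
    simp only [Option.some.injEq] at h'
    rw [h']
  · rename_i h'
    rw [h] at h'
    exact absurd h' (by simp)

theorem pvBLoop_none {v : List Char} (h : pvBCond v = none) (marks : List (List Char)) :
    pvBLoop marks v = marks.flatten ++ pvCore v := by
  rw [pvBLoop]
  split
  · rename_i m h'
    rw [h] at h'; exact absurd h' (by simp)
  · rw [pvJoin_nil]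

theorem pvLoop_eq_go (n : Nat) : ∀ (cs : List Char), cs.length ≤ n →
    ∀ (marks : List (List Char)),
      pvBLoop marks (PySem.Chars.strip cs) = marks.flatten ++ pvGoA cs := by
  induction n with
  | zero =>
    intro cs hcs marks
    have hcs0 : cs = [] := List.eq_nil_of_length_eq_zero (Nat.le_zero.mp hcs)
    subst hcs0
    have hA : pvAFind pvModItems (PySem.Chars.strip []) = none := by decide
    have hB : pvBCond (PySem.Chars.strip ([] : List Char)) = none := by decide
    rw [pvBLoop_none hB, pvGoA_none hA]
  | succ n ih =>
    intro cs hcs marks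
    cases hA : pvAFind pvModItems (PySem.Chars.strip cs) with
    | some pi =>
      obtain ⟨mark, inner⟩ := pi
      have hmap := pv_step_eq (PySem.Chars.strip cs)
      rw [hA] at hmap
      cases hB : pvBCond (PySem.Chars.strip cs) with
      | none => rw [hB] at hmap; simp at hmap
      | some m =>
        rw [hB] at hmap
        simp only [Option.map_some, Option.some.injEq, Prod.mk.injEq] at hmap
        have hlen : inner.length ≤ n := by
          have := lt_of_lt_of_le (pvAFind_len hA) (pvStrip_len cs); omega
        rw [pvBLoop_some hB, ← hmap.1, ← hmap.2, pvGoA_some hA, ih inner hlen (marks ++ [mark])]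
        simp
    | none =>
      have hmap := pv_step_eq (PySem.Chars.strip cs)
      rw [hA] at hmap
      cases hB : pvBCond (PySem.Chars.strip cs) with
      | some m => rw [hB] at hmap; simp at hmap
      | none => rw [pvBLoop_none hB, pvGoA_none hA]

-- ===== VERDICT (by name: the statement is the Claim_ definition above) =====
theorem qmk_to_human_spec : Claim_equal_qmk_to_human := by
  intro value _
  unfold Spec_qmk_to_human qmk_to_human qmk_to_human_alt
  rw [pvLoop_eq_go value.toList.length value.toList le_rfl []]
  rfl
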